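-- pv_equiv track=rewrite | github.com/BigNeuronsAgency/tomorrow-online | _archive-webflow/extract_and_convert.py | convert_colors
-- ===== SOURCE A (Python) =====
-- def convert_colors(text):
--     """Change UNIQUEMENT les couleurs magenta/rose → cyan"""
--     replacements = {
--         'linear-gradient(90deg,rgba(180,7,254,1) 0%,rgba(255,10,55,1) 100%)': '#00F0FF',
--         'rgba(180,7,254,1)': '#00F0FF',
--         'rgba(255,10,55,1)': '#00F0FF',
--         'rgba(180,7,254,.7)': 'rgba(0,240,255,0.7)',
--         'rgba(180,7,254,.4)': 'rgba(0,240,255,0.4)',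
--         'rgba(180,7,254,.2)': 'rgba(0,240,255,0.2)',
--         'rgba(180,7,254,0)': 'rgba(0,240,255,0)',
--         'rgba(255,10,55,.3)': 'rgba(0,240,255,0.3)',
--         'rgba(255,10,55,0)': 'rgba(0,240,255,0)',
--         '#FF3333': '#00F0FF',
--         'rgba(255,51,51,.2)': 'rgba(0,240,255,0.2)',
--     }
--
--     result = text
--     for old, new in replacements.items():
--         result = result.replace(old, new)
--     return result
-- ===== SOURCE B (Python) =====
-- import re
--
-- # One compiled alternation + a single re.sub pass with a dict-lookup callback,
-- # instead of eleven sequential full-string .replace scans.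
-- _REPLACEMENTS = {
--     'linear-gradient(90deg,rgba(180,7,254,1) 0%,rgba(255,10,55,1) 100%)': '#00F0FF',
--     'rgba(180,7,254,1)': '#00F0FF',
--     'rgba(255,10,55,1)': '#00F0FF',
--     'rgba(180,7,254,.7)': 'rgba(0,240,255,0.7)',
--     'rgba(180,7,254,.4)': 'rgba(0,240,255,0.4)',
--     'rgba(180,7,254,.2)': 'rgba(0,240,255,0.2)',
--     'rgba(180,7,254,0)': 'rgba(0,240,255,0)',
--     'rgba(255,10,55,.3)': 'rgba(0,240,255,0.3)',
--     'rgba(255,10,55,0)': 'rgba(0,240,255,0)',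
--     '#FF3333': '#00F0FF',
--     'rgba(255,51,51,.2)': 'rgba(0,240,255,0.2)',
-- }
-- _PATTERN = re.compile('|'.join(re.escape(k) for k in _REPLACEMENTS))
--
-- def convert_colors(text):
--     """Change UNIQUEMENT les couleurs magenta/rose → cyan"""
--     return _PATTERN.sub(lambda m: _REPLACEMENTS[m.group(0)], text)
-- ===== Notes on version B (the rewrite author's own statement) =====
-- stated objective: alternative
-- what changed: Replaced eleven sequential full-string str.replace passes by one compiled regex alternation (all keys re.escape'd, dict order keeps the long gradient first) applied in a single left-to-right re.sub pass with a dict-lookup callback.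
import Mathlib
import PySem

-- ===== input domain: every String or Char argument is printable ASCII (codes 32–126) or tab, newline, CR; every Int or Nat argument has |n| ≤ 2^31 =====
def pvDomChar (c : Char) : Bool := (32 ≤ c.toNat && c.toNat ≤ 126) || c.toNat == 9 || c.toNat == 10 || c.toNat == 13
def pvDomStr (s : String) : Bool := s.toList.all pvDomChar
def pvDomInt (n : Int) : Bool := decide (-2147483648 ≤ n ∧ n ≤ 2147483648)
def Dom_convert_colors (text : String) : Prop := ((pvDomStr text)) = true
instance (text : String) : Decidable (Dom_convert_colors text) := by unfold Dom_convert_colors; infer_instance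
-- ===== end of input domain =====

-- B replaces the eleven sequential full-string .replace scans by one left-to-right pass
-- dispatching on which key starts at the current position (objective: alternative single-pass algorithm).

-- ===== PORT A =====
-- A: a dict of replacements applied one after the other with str.replace.
def convert_colors (text : String) : String :=
  let replacements : List (String × String) :=
    [("linear-gradient(90deg,rgba(180,7,254,1) 0%,rgba(255,10,55,1) 100%)", "#00F0FF"),
     ("rgba(180,7,254,1)", "#00F0FF"),
     ("rgba(255,10,55,1)", "#00F0FF"),
     ("rgba(180,7,254,.7)", "rgba(0,240,255,0.7)"),
     ("rgba(180,7,254,.4)", "rgba(0,240,255,0.4)"),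
     ("rgba(180,7,254,.2)", "rgba(0,240,255,0.2)"),
     ("rgba(180,7,254,0)", "rgba(0,240,255,0)"),
     ("rgba(255,10,55,.3)", "rgba(0,240,255,0.3)"),
     ("rgba(255,10,55,0)", "rgba(0,240,255,0)"),
     ("#FF3333", "#00F0FF"),
     ("rgba(255,51,51,.2)", "rgba(0,240,255,0.2)")]
  replacements.foldl (fun result kv => PySem.Str.replace result kv.1 kv.2) text

-- ===== PORT B =====
-- The alternation table of B's compiled regex, in the dict's (= pattern's) order.
def pvKV : List (List Char × List Char) :=
  [("linear-gradient(90deg,rgba(180,7,254,1) 0%,rgba(255,10,55,1) 100%)".toList, "#00F0FF".toList),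
   ("rgba(180,7,254,1)".toList, "#00F0FF".toList),
   ("rgba(255,10,55,1)".toList, "#00F0FF".toList),
   ("rgba(180,7,254,.7)".toList, "rgba(0,240,255,0.7)".toList),
   ("rgba(180,7,254,.4)".toList, "rgba(0,240,255,0.4)".toList),
   ("rgba(180,7,254,.2)".toList, "rgba(0,240,255,0.2)".toList),
   ("rgba(180,7,254,0)".toList, "rgba(0,240,255,0)".toList),
   ("rgba(255,10,55,.3)".toList, "rgba(0,240,255,0.3)".toList),
   ("rgba(255,10,55,0)".toList, "rgba(0,240,255,0)".toList),
   ("#FF3333".toList, "#00F0FF".toList),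
   ("rgba(255,51,51,.2)".toList, "rgba(0,240,255,0.2)".toList)]

-- first alternative of the pattern matching at the current position (regex alternation)
def pvTryKeys (kv : List (List Char × List Char)) (l : List Char) : Option (List Char × List Char) :=
  kv.find? (fun pr => pr.1.isPrefixOf l)

-- every key of the table is nonempty (needed for termination of the scan)
theorem pvKV_key_ne_nil : ∀ pr ∈ pvKV, pr.1 ≠ [] := by decide

-- re.sub's single left-to-right scan: emit the replacement and jump over a match,
-- otherwise copy one character and move on.
def pvSub : List Char → List Char
  | [] => []
  | c :: t =>
    match h : pvTryKeys pvKV (c :: t) with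
    | some kw => kw.2 ++ pvSub ((c :: t).drop kw.1.length)
    | none => c :: pvSub t
termination_by l => l.length
decreasing_by
  · have hmem := List.mem_of_find?_eq_some h
    have hne := pvKV_key_ne_nil _ hmem
    have : 0 < kw.1.length := List.length_pos_iff.mpr hne
    simp only [List.length_drop, List.length_cons]
    omega
  · simp

def convert_colors_alt (text : String) : String := String.ofList (pvSub text.toList)

-- ===== PRECONDITION & SPEC =====
def Spec_convert_colors (text : String) (out : String) : Prop := out = convert_colors_alt text
instance (text : String) (out : String) : Decidable (Spec_convert_colors text out) := by unfold Spec_convert_colors; infer_instance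

-- ===== CLAIM (what is proved, stated in full; the proofs are below) =====
def Claim_equal_convert_colors : Prop := ∀ (text : String), Dom_convert_colors text → Spec_convert_colors text (convert_colors text)

-- ===== LEMMAS AND PROOFS =====

theorem pvSub_cons_none (c : Char) (t : List Char) (h : pvTryKeys pvKV (c :: t) = none) :
    pvSub (c :: t) = c :: pvSub t := by
  rw [pvSub, h]

theorem pvSub_cons_some (c : Char) (t : List Char) (kw : List Char × List Char)
    (h : pvTryKeys pvKV (c :: t) = some kw) :
    pvSub (c :: t) = kw.2 ++ pvSub ((c :: t).drop kw.1.length) := by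
  rw [pvSub, h]

-- the sequential-replace chain of port A, at the character level
def pvChain (l : List Char) : List Char :=
  pvKV.foldl (fun s pr => PySem.Chars.replace s pr.1 pr.2) l

-- ---- a fuel-free rendering of PySem.Chars.replace's scanning loop ----
def pvRep (old new : List Char) : List Char → List Char
  | [] => []
  | c :: t =>
    if old ≠ [] ∧ old.isPrefixOf (c :: t) then new ++ pvRep old new ((c :: t).drop old.length)
    else c :: pvRep old new t
termination_by l => l.length
decreasing_by
  · rename_i h
    have : 0 < old.length := List.length_pos_iff.mpr h.1
    simp only [List.length_drop, List.length_cons]; omega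
  · simp

theorem pvGo_eq (old new : List Char) (hne : old ≠ []) :
    ∀ (fuel : Nat) (l acc : List Char), l.length ≤ fuel →
      PySem.Chars.replace.go old new fuel l acc = acc.reverse ++ pvRep old new l := by
  intro fuel
  induction fuel with
  | zero =>
    intro l acc hl
    have : l = [] := by cases l <;> simp_all
    subst this
    simp [PySem.Chars.replace.go, pvRep]
  | succ n ih =>
    intro l acc hl
    cases l with
    | nil => simp [PySem.Chars.replace.go, pvRep]
    | cons c t =>
      by_cases hp : old.isPrefixOf (c :: t)
      · rw [show PySem.Chars.replace.go old new (n+1) (c :: t) acc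
            = PySem.Chars.replace.go old new n ((c :: t).drop old.length) (new.reverse ++ acc) by
          simp [PySem.Chars.replace.go, hp]]
        rw [ih _ _ (by
          simp only [List.length_drop, List.length_cons] at *
          have : 0 < old.length := List.length_pos_iff.mpr hne
          omega)]
        rw [show pvRep old new (c :: t) = new ++ pvRep old new ((c :: t).drop old.length) by
          rw [pvRep]; simp [hne, hp]]
        simp
      · rw [show PySem.Chars.replace.go old new (n+1) (c :: t) acc
            = PySem.Chars.replace.go old new n t (c :: acc) by
          simp [PySem.Chars.replace.go, hp]]
        rw [ih _ _ (by simp at hl ⊢; omega)]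
        rw [show pvRep old new (c :: t) = c :: pvRep old new t by
          rw [pvRep]; simp [hp]]
        simp

theorem pvReplace_eq (l old new : List Char) (hne : old ≠ []) :
    PySem.Chars.replace l old new = pvRep old new l := by
  unfold PySem.Chars.replace
  rw [if_neg (by simp [hne]), pvGo_eq old new hne l.length l [] le_rfl]
  simp

theorem pvRep_match (old new l : List Char) (hne : old ≠ []) (hp : old <+: l) :
    pvRep old new l = new ++ pvRep old new (l.drop old.length) := by
  cases l with
  | nil => exact absurd (List.prefix_nil.mp hp) hne
  | cons c t => rw [pvRep, if_pos ⟨hne, List.isPrefixOf_iff_prefix.mpr hp⟩]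

theorem pvRep_skip (old new : List Char) (hne : old ≠ []) :
    ∀ (m : ℕ) (l : List Char), m ≤ l.length → (∀ i, i < m → ¬ old <+: l.drop i) →
      pvRep old new l = l.take m ++ pvRep old new (l.drop m) := by
  intro m
  induction m with
  | zero => intro l _ _; simp
  | succ n ih =>
    intro l hm hno
    cases l with
    | nil => simp at hm
    | cons c t =>
      have h0 : ¬ old <+: (c :: t) := by simpa using hno 0 (Nat.succ_pos n)
      rw [pvRep, if_neg (by
        rw [List.isPrefixOf_iff_prefix]
        exact fun h => h0 h.2)]
      rw [ih t (by simp at hm; omega) (fun i hi => by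
        have := hno (i+1) (by omega)
        simpa using this)]
      simp

theorem pvRep_id (old new l : List Char) (hne : old ≠ [])
    (hno : ∀ i, ¬ old <+: l.drop i) : pvRep old new l = l := by
  rw [pvRep_skip old new hne l.length l le_rfl (fun i _ => hno i)]
  rw [List.drop_length, List.take_length]
  simp [pvRep]

-- ---- decidable facts about the literal table (checked once by the kernel) ----
def pvHeads : List Char := ['l', 'r', '#']

def pvGp : List Char × List Char :=
  ("linear-gradient(90deg,rgba(180,7,254,1) 0%,rgba(255,10,55,1) 100%)".toList, "#00F0FF".toList)

theorem pvKV_eq : pvKV = pvGp :: pvKV.tail := rfl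

set_option maxRecDepth 4000 in
theorem pvCond2B : (pvKV.all (fun a => pvKV.all (fun b =>
    a == b || (!(a.1.isPrefixOf b.1) && !(b.1.isPrefixOf a.1))))) = true := by decide

theorem pvCond2P : ∀ a ∈ pvKV, ∀ b ∈ pvKV, a ≠ b → ¬ a.1 <+: b.1 ∧ ¬ b.1 <+: a.1 := by
  have h := pvCond2B
  simp only [List.all_eq_true, Bool.or_eq_true, beq_iff_eq, Bool.and_eq_true,
    Bool.not_eq_true', ← Bool.not_eq_true, List.isPrefixOf_iff_prefix] at h
  intro a ha b hb hne
  rcases h a ha b hb with he | hc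
  · exact absurd he hne
  · exact hc

set_option maxRecDepth 4000 in
theorem pvCond3B : (pvKV.tail.all (fun pr => pr.1.tail.all (fun c => !(pvHeads.contains c)))) = true := by decide

theorem pvCond3P : ∀ pr ∈ pvKV.tail, ∀ c ∈ pr.1.tail, c ∉ pvHeads := by
  have h := pvCond3B
  simp only [List.all_eq_true, Bool.not_eq_true', List.contains_eq_mem,
    decide_eq_false_iff_not] at h
  exact h

set_option maxRecDepth 4000 in
theorem pvCond4B : (pvKV.all (fun p => pvKV.all (fun q => (List.range p.2.length).all (fun o =>
    !((p.2.drop o).isPrefixOf q.1) && !(q.1.isPrefixOf (p.2.drop o)))))) = true := by decide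

theorem pvCond4P : ∀ p ∈ pvKV, ∀ q ∈ pvKV, ∀ o, o < p.2.length →
    ¬ (p.2.drop o) <+: q.1 ∧ ¬ q.1 <+: (p.2.drop o) := by
  have h := pvCond4B
  simp only [List.all_eq_true, List.mem_range, Bool.and_eq_true, Bool.not_eq_true',
    ← Bool.not_eq_true, List.isPrefixOf_iff_prefix] at h
  intro p hp q hq o ho
  exact h p hp q hq o ho

set_option maxRecDepth 4000 in
theorem pvCond5B : (pvKV.all (fun pr => !pr.2.isEmpty && pvHeads.contains (pr.2.headD ' '))) = true := by decide

theorem pvCond5P : ∀ pr ∈ pvKV, pr.2 ≠ [] ∧ pr.2.headD ' ' ∈ pvHeads := by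
  have h := pvCond5B
  simp only [List.all_eq_true, Bool.and_eq_true, Bool.not_eq_true', List.isEmpty_eq_false_iff,
    List.contains_eq_mem, decide_eq_true_eq] at h
  exact h

set_option maxRecDepth 4000 in
theorem pvCond6B : (pvKV.all (fun pr => pvHeads.contains (pr.1.headD ' '))) = true := by decide

theorem pvCond6P : ∀ pr ∈ pvKV, pr.1.headD ' ' ∈ pvHeads := by
  have h := pvCond6B
  simp only [List.all_eq_true, List.contains_eq_mem, decide_eq_true_eq] at h
  exact h

set_option maxRecDepth 4000 in
theorem pvNodup : pvKV.Nodup := by decide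

-- ---- small generic list facts used by the scan/replace correspondence ----
theorem pvPrefix_left {α : Type} {k a b : List α} (h : k <+: a ++ b)
    (hl : k.length ≤ a.length) : k <+: a := by
  rw [List.prefix_iff_eq_take] at h ⊢
  rw [List.take_append, Nat.sub_eq_zero_of_le hl] at h
  simpa using h

theorem pvPrefix_append_cases {α : Type} {k a b : List α} (h : k <+: a ++ b) :
    k <+: a ∨ a <+: k := by
  rcases Nat.lt_or_ge a.length k.length with hl | hl
  · right
    rw [List.prefix_iff_eq_take] at h
    have ha : k.take a.length = a := by
      rw [h, List.take_take, min_eq_left (le_of_lt hl), List.take_left' rfl]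
    rw [← ha]
    exact List.take_prefix _ _
  · exact Or.inl (pvPrefix_left h hl)

theorem pvPrefix_getElem {α : Type} {k s : List α} {q o : ℕ} (h : k <+: s.drop q)
    (ho : o < k.length) (hq : q + o < s.length) :
    k[o] = s[q + o]'hq := by
  have h2 : o < (s.drop q).length := lt_of_lt_of_le ho h.length_le
  rw [h.getElem ho, List.getElem_drop]

theorem pvHeadD_eq {α : Type} {l : List α} (d : α) (h : 0 < l.length) :
    l.headD d = l[0] := by
  cases l with
  | nil => simp at h
  | cons a t => simp

theorem pvGetElem_mem_tail {α : Type} {l : List α} {o : ℕ} (h1 : 1 ≤ o) (h2 : o < l.length) :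
    l[o] ∈ l.tail := by
  cases l with
  | nil => simp at h2
  | cons a t =>
    obtain ⟨m, rfl⟩ : ∃ m, o = m + 1 := ⟨o - 1, by omega⟩
    simp only [List.getElem_cons_succ, List.tail_cons]
    exact List.getElem_mem _

-- ---- no key of the table matches below the current position ----
-- N1: while the matched key kj (a short one) is still in place, a later short key k
-- cannot match anywhere in the prefix region, whatever the already-rewritten tail R is.
theorem pvN1 (u kj wj r R k w : List Char)
    (hu : ∀ q, q < u.length → ∀ pr, pr ∈ pvKV → ¬ pr.1 <+: (u ++ (kj ++ r)).drop q)
    (hkj : (kj, wj) ∈ pvKV.tail)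
    (hk : (k, w) ∈ pvKV.tail)
    (hrel : ¬ k <+: kj ∧ ¬ kj <+: k) :
    ∀ q, q < u.length + kj.length → ¬ k <+: (u ++ (kj ++ R)).drop q := by
  have hkKV : (k, w) ∈ pvKV := List.mem_of_mem_tail hk
  have hkjKV : (kj, wj) ∈ pvKV := List.mem_of_mem_tail hkj
  have hkne : k ≠ [] := pvKV_key_ne_nil _ hkKV
  have hkjne : kj ≠ [] := pvKV_key_ne_nil _ hkjKV
  have hk0 : 0 < k.length := List.length_pos_iff.mpr hkne
  have hkj0 : 0 < kj.length := List.length_pos_iff.mpr hkjne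
  intro q hq hpre
  rcases Nat.lt_trichotomy q u.length with h1 | h2 | h3
  · by_cases hfit : q + k.length ≤ u.length + kj.length
    · have hsplit : (u ++ (kj ++ R)).drop q = (u ++ kj).drop q ++ R := by
        rw [← List.append_assoc, List.drop_append_of_le_length (by simp; omega)]
      have hk' : k <+: (u ++ kj).drop q := by
        refine pvPrefix_left (hsplit ▸ hpre) ?_
        simp only [List.length_drop, List.length_append]
        omega
      refine hu q h1 (k, w) hkKV ?_
      rw [← List.append_assoc, List.drop_append_of_le_length (by simp; omega)]
      exact hk'.trans (List.prefix_append _ _)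
    · have ho1 : 1 ≤ u.length - q := by omega
      have ho2 : u.length - q < k.length := by omega
      have hslen : q + (u.length - q) < (u ++ (kj ++ R)).length := by
        simp only [List.length_append]; omega
      have hc := pvPrefix_getElem hpre ho2 hslen
      have hidx : q + (u.length - q) = u.length := by omega
      have hval : (u ++ (kj ++ R))[q + (u.length - q)]'hslen = kj[0] := by
        simp only [hidx]
        rw [List.getElem_append_right (le_refl u.length)]
        simp only [Nat.sub_self]
        rw [List.getElem_append_left hkj0]
      have hhead : kj[0] ∈ pvHeads := by
        rw [← pvHeadD_eq ' ' hkj0]; exact pvCond6P _ hkjKV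
      exact pvCond3P _ hk _ (pvGetElem_mem_tail ho1 ho2) (by rw [hc, hval]; exact hhead)
  · have hdrop : (u ++ (kj ++ R)).drop q = kj ++ R := by
      rw [h2, List.drop_left' rfl]
    rcases pvPrefix_append_cases (hdrop ▸ hpre) with hc | hc
    · exact hrel.1 hc
    · exact hrel.2 hc
  · have ho1 : 1 ≤ q - u.length := by omega
    have ho2 : q - u.length < kj.length := by omega
    have hslen : q + 0 < (u ++ (kj ++ R)).length := by
      simp only [List.length_append]; omega
    have hc := pvPrefix_getElem hpre hk0 hslen
    have hval : (u ++ (kj ++ R))[q + 0]'hslen = kj[q - u.length] := by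
      simp only [Nat.add_zero]
      rw [List.getElem_append_right (by omega : u.length ≤ q)]
      rw [List.getElem_append_left ho2]
    have hhead : k[0] ∈ pvHeads := by
      rw [← pvHeadD_eq ' ' hk0]; exact pvCond6P _ hkKV
    exact pvCond3P _ hkj _ (pvGetElem_mem_tail ho1 ho2) (by rw [← hval, ← hc]; exact hhead)

-- N1 on the untouched input (used for the very first pass, the gradient key).
theorem pvN1pristine (u kj wj r k w : List Char)
    (hu : ∀ q, q < u.length → ∀ pr, pr ∈ pvKV → ¬ pr.1 <+: (u ++ (kj ++ r)).drop q)
    (hkj : (kj, wj) ∈ pvKV.tail)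
    (hk : (k, w) ∈ pvKV)
    (hrel : ¬ k <+: kj ∧ ¬ kj <+: k) :
    ∀ q, q < u.length + kj.length → ¬ k <+: (u ++ (kj ++ r)).drop q := by
  have hkjKV : (kj, wj) ∈ pvKV := List.mem_of_mem_tail hkj
  have hkne : k ≠ [] := pvKV_key_ne_nil _ hk
  have hkjne : kj ≠ [] := pvKV_key_ne_nil _ hkjKV
  have hk0 : 0 < k.length := List.length_pos_iff.mpr hkne
  have hkj0 : 0 < kj.length := List.length_pos_iff.mpr hkjne
  intro q hq hpre
  rcases Nat.lt_trichotomy q u.length with h1 | h2 | h3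
  · exact hu q h1 (k, w) hk hpre
  · have hdrop : (u ++ (kj ++ r)).drop q = kj ++ r := by
      rw [h2, List.drop_left' rfl]
    rcases pvPrefix_append_cases (hdrop ▸ hpre) with hc | hc
    · exact hrel.1 hc
    · exact hrel.2 hc
  · have ho1 : 1 ≤ q - u.length := by omega
    have ho2 : q - u.length < kj.length := by omega
    have hslen : q + 0 < (u ++ (kj ++ r)).length := by
      simp only [List.length_append]; omega
    have hc := pvPrefix_getElem hpre hk0 hslen
    have hval : (u ++ (kj ++ r))[q + 0]'hslen = kj[q - u.length] := by
      simp only [Nat.add_zero]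
      rw [List.getElem_append_right (by omega : u.length ≤ q)]
      rw [List.getElem_append_left ho2]
    have hhead : k[0] ∈ pvHeads := by
      rw [← pvHeadD_eq ' ' hk0]; exact pvCond6P _ hk
    exact pvCond3P _ hkj _ (pvGetElem_mem_tail ho1 ho2) (by rw [← hval, ← hc]; exact hhead)

-- the matched key itself cannot also match strictly before position p
theorem pvN1self (u kj wj r R : List Char)
    (hu : ∀ q, q < u.length → ∀ pr, pr ∈ pvKV → ¬ pr.1 <+: (u ++ (kj ++ r)).drop q)
    (hmem : (kj, wj) ∈ pvKV) :
    ∀ q, q < u.length → ¬ kj <+: (u ++ (kj ++ R)).drop q := by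
  intro q h1 hpre
  have hsplit : (u ++ (kj ++ R)).drop q = (u ++ kj).drop q ++ R := by
    rw [← List.append_assoc, List.drop_append_of_le_length (by simp; omega)]
  have hk' : kj <+: (u ++ kj).drop q := by
    refine pvPrefix_left (hsplit ▸ hpre) ?_
    simp only [List.length_drop, List.length_append]
    omega
  refine hu q h1 (kj, wj) hmem ?_
  rw [← List.append_assoc, List.drop_append_of_le_length (by simp; omega)]
  exact hk'.trans (List.prefix_append _ _)

-- N2: once the match is replaced by wj, no short key matches in the prefix region.
theorem pvN2 (u kj wj r R k w : List Char)
    (hu : ∀ q, q < u.length → ∀ pr, pr ∈ pvKV → ¬ pr.1 <+: (u ++ (kj ++ r)).drop q)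
    (hkjKV : (kj, wj) ∈ pvKV)
    (hk : (k, w) ∈ pvKV.tail) :
    ∀ q, q < u.length + wj.length → ¬ k <+: (u ++ (wj ++ R)).drop q := by
  have hkKV : (k, w) ∈ pvKV := List.mem_of_mem_tail hk
  have hkne : k ≠ [] := pvKV_key_ne_nil _ hkKV
  have hk0 : 0 < k.length := List.length_pos_iff.mpr hkne
  have hwj := pvCond5P _ hkjKV
  have hwj0 : 0 < wj.length := List.length_pos_iff.mpr hwj.1
  intro q hq hpre
  rcases Nat.lt_or_ge q u.length with h1 | h2
  · by_cases hfit : q + k.length ≤ u.length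
    · have hsplit : (u ++ (wj ++ R)).drop q = u.drop q ++ (wj ++ R) := by
        rw [List.drop_append_of_le_length (by omega)]
      have hk' : k <+: u.drop q := by
        refine pvPrefix_left (hsplit ▸ hpre) ?_
        simp only [List.length_drop]
        omega
      refine hu q h1 (k, w) hkKV ?_
      rw [List.drop_append_of_le_length (by omega)]
      exact hk'.trans (List.prefix_append _ _)
    · have ho1 : 1 ≤ u.length - q := by omega
      have ho2 : u.length - q < k.length := by omega
      have hslen : q + (u.length - q) < (u ++ (wj ++ R)).length := by
        simp only [List.length_append]; omega
      have hc := pvPrefix_getElem hpre ho2 hslen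
      have hidx : q + (u.length - q) = u.length := by omega
      have hval : (u ++ (wj ++ R))[q + (u.length - q)]'hslen = wj[0] := by
        simp only [hidx]
        rw [List.getElem_append_right (le_refl u.length)]
        simp only [Nat.sub_self]
        rw [List.getElem_append_left hwj0]
      have hhead : wj[0] ∈ pvHeads := by
        rw [← pvHeadD_eq ' ' hwj0]; exact hwj.2
      exact pvCond3P _ hk _ (pvGetElem_mem_tail ho1 ho2) (by rw [hc, hval]; exact hhead)
  · have ho2 : q - u.length < wj.length := by omega
    have hdrop : (u ++ (wj ++ R)).drop q = wj.drop (q - u.length) ++ R := by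
      have hq' : q = u.length + (q - u.length) := by omega
      rw [hq', List.drop_append, List.drop_append_of_le_length (by omega)]
      rw [List.drop_eq_nil_iff.mpr (by omega), List.nil_append]
    rcases pvPrefix_append_cases (hdrop ▸ hpre) with hc | hc
    · exact (pvCond4P _ hkjKV _ hkKV (q - u.length) ho2).2 hc
    · exact (pvCond4P _ hkjKV _ hkKV (q - u.length) ho2).1 hc

-- ---- passing a whole pass over the protected prefix ----
theorem pvChainSkip1 (u kj wj r : List Char)
    (hu : ∀ q, q < u.length → ∀ pr, pr ∈ pvKV → ¬ pr.1 <+: (u ++ (kj ++ r)).drop q)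
    (hkj : (kj, wj) ∈ pvKV.tail) :
    ∀ (P : List (List Char × List Char)),
      (∀ pr ∈ P, pr ∈ pvKV.tail ∧ ¬ pr.1 <+: kj ∧ ¬ kj <+: pr.1) →
      ∀ R, P.foldl (fun s pr => PySem.Chars.replace s pr.1 pr.2) (u ++ (kj ++ R))
          = u ++ (kj ++ P.foldl (fun s pr => PySem.Chars.replace s pr.1 pr.2) R) := by
  intro P
  induction P with
  | nil => intro _ R; simp
  | cons pr P ih =>
    intro hP R
    obtain ⟨k2, w2⟩ := pr
    have h1 := hP (k2, w2) List.mem_cons_self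
    have hprKV : (k2, w2) ∈ pvKV := List.mem_of_mem_tail h1.1
    have hne := pvKV_key_ne_nil _ hprKV
    have hstep : PySem.Chars.replace (u ++ (kj ++ R)) k2 w2
        = u ++ (kj ++ PySem.Chars.replace R k2 w2) := by
      rw [pvReplace_eq _ _ _ hne, pvReplace_eq _ _ _ hne]
      rw [pvRep_skip k2 w2 hne (u.length + kj.length) _
            (by simp only [List.length_append]; omega)
            (fun i hi hp => pvN1 u kj wj r R k2 w2 hu hkj h1.1 h1.2 i hi hp)]
      rw [← List.append_assoc, List.take_left' (by simp), List.drop_left' (by simp)]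
      simp [List.append_assoc]
    simp only [List.foldl_cons, hstep]
    exact ih (fun x hx => hP x (List.mem_cons_of_mem _ hx)) _

theorem pvChainSkip2 (u kj wj r : List Char)
    (hu : ∀ q, q < u.length → ∀ pr, pr ∈ pvKV → ¬ pr.1 <+: (u ++ (kj ++ r)).drop q)
    (hkjKV : (kj, wj) ∈ pvKV) :
    ∀ (P : List (List Char × List Char)),
      (∀ pr ∈ P, pr ∈ pvKV.tail) →
      ∀ R, P.foldl (fun s pr => PySem.Chars.replace s pr.1 pr.2) (u ++ (wj ++ R))
          = u ++ (wj ++ P.foldl (fun s pr => PySem.Chars.replace s pr.1 pr.2) R) := by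
  intro P
  induction P with
  | nil => intro _ R; simp
  | cons pr P ih =>
    intro hP R
    obtain ⟨k2, w2⟩ := pr
    have h1 := hP (k2, w2) List.mem_cons_self
    have hprKV : (k2, w2) ∈ pvKV := List.mem_of_mem_tail h1
    have hne := pvKV_key_ne_nil _ hprKV
    have hstep : PySem.Chars.replace (u ++ (wj ++ R)) k2 w2
        = u ++ (wj ++ PySem.Chars.replace R k2 w2) := by
      rw [pvReplace_eq _ _ _ hne, pvReplace_eq _ _ _ hne]
      rw [pvRep_skip k2 w2 hne (u.length + wj.length) _
            (by simp only [List.length_append]; omega)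
            (fun i hi hp => pvN2 u kj wj r R k2 w2 hu hkjKV h1 i hi hp)]
      rw [← List.append_assoc, List.take_left' (by simp), List.drop_left' (by simp)]
      simp [List.append_assoc]
    simp only [List.foldl_cons, hstep]
    exact ih (fun x hx => hP x (List.mem_cons_of_mem _ hx)) _

-- ---- decomposition of the sequential-replace chain at the first match ----
theorem pvChain_decomp (u kj wj r : List Char) (hmem : (kj, wj) ∈ pvKV)
    (hu : ∀ q, q < u.length → ∀ pr, pr ∈ pvKV → ¬ pr.1 <+: (u ++ (kj ++ r)).drop q) :
    pvChain (u ++ (kj ++ r)) = u ++ (wj ++ pvChain r) := by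
  have hkjne := pvKV_key_ne_nil _ hmem
  have hnd : pvKV.Nodup := pvNodup
  -- the matching step itself, valid for any current tail R
  have hstepj : ∀ R, PySem.Chars.replace (u ++ (kj ++ R)) kj wj
      = u ++ (wj ++ PySem.Chars.replace R kj wj) := by
    intro R
    rw [pvReplace_eq _ _ _ hkjne, pvReplace_eq _ _ _ hkjne]
    rw [pvRep_skip kj wj hkjne u.length _
          (by simp only [List.length_append]; omega)
          (fun i hi hp => pvN1self u kj wj r R hu hmem i hi hp)]
    rw [List.take_left' rfl, List.drop_left' rfl]
    rw [pvRep_match _ _ _ hkjne (List.prefix_append _ _), List.drop_left' rfl]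
  rcases List.mem_cons.mp (pvKV_eq ▸ hmem) with hhead | htail
  · -- kj is the first (gradient) pair
    rw [pvChain, pvChain, pvKV_eq, ← hhead, List.foldl_cons, List.foldl_cons, hstepj r]
    exact pvChainSkip2 u kj wj r hu hmem pvKV.tail (fun x hx => hx) _
  · -- kj is one of the later pairs
    obtain ⟨T1, T2, hT⟩ := List.append_of_mem htail
    have hGKV : pvGp ∈ pvKV := by rw [pvKV_eq]; exact List.mem_cons_self
    have hGne := pvKV_key_ne_nil _ hGKV
    have hneG : pvGp ≠ (kj, wj) := by
      intro he
      rw [pvKV_eq] at hnd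
      exact (List.nodup_cons.mp hnd).1 (he ▸ htail)
    have hrelG : ¬ pvGp.1 <+: kj ∧ ¬ kj <+: pvGp.1 := by
      have := pvCond2P pvGp hGKV (kj, wj) hmem hneG
      exact this
    have hndtail : pvKV.tail.Nodup := by
      rw [pvKV_eq] at hnd
      exact (List.nodup_cons.mp hnd).2
    have hnotmem : (kj, wj) ∉ T1 ++ T2 := by
      rw [hT] at hndtail
      exact (List.nodup_cons.mp (List.nodup_middle.mp hndtail)).1
    have hT1 : ∀ pr ∈ T1, pr ∈ pvKV.tail ∧ ¬ pr.1 <+: kj ∧ ¬ kj <+: pr.1 := by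
      intro pr hpr
      have hmemtail : pr ∈ pvKV.tail := by
        rw [hT]; exact List.mem_append_left _ hpr
      have hprne : pr ≠ (kj, wj) := by
        intro he
        exact hnotmem (he ▸ List.mem_append_left _ hpr)
      exact ⟨hmemtail, pvCond2P pr (List.mem_of_mem_tail hmemtail) (kj, wj) hmem hprne⟩
    have hT2 : ∀ pr ∈ T2, pr ∈ pvKV.tail := by
      intro pr hpr
      rw [hT]
      exact List.mem_append_right _ (List.mem_cons_of_mem _ hpr)
    -- step 1: the gradient pass on the untouched input
    have hstep1 : PySem.Chars.replace (u ++ (kj ++ r)) pvGp.1 pvGp.2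
        = u ++ (kj ++ PySem.Chars.replace r pvGp.1 pvGp.2) := by
      rw [pvReplace_eq _ _ _ hGne, pvReplace_eq _ _ _ hGne]
      rw [pvRep_skip _ _ hGne (u.length + kj.length) _
            (by simp only [List.length_append]; omega)
            (fun i hi hp => pvN1pristine u kj wj r pvGp.1 pvGp.2 hu htail hGKV hrelG i hi hp)]
      rw [← List.append_assoc, List.take_left' (by simp), List.drop_left' (by simp)]
      simp [List.append_assoc]
    rw [pvChain, pvChain, pvKV_eq, hT, List.foldl_cons, List.foldl_cons, hstep1,
       List.foldl_append, List.foldl_append, List.foldl_cons, List.foldl_cons]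
    rw [pvChainSkip1 u kj wj r hu htail T1 hT1 _]
    rw [hstepj _]
    rw [pvChainSkip2 u kj wj r hu hmem T2 hT2 _]

-- ---- the identity cases: no key occurs anywhere ----
theorem pvFoldl_id (l : List Char)
    (hno : ∀ q, ∀ pr, pr ∈ pvKV → ¬ pr.1 <+: l.drop q) :
    ∀ (P : List (List Char × List Char)), (∀ pr ∈ P, pr ∈ pvKV) →
      P.foldl (fun s pr => PySem.Chars.replace s pr.1 pr.2) l = l := by
  intro P
  induction P with
  | nil => intro _; simp
  | cons pr P ih =>
    intro hP
    obtain ⟨k2, w2⟩ := pr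
    have hprKV : (k2, w2) ∈ pvKV := hP _ List.mem_cons_self
    have hne := pvKV_key_ne_nil _ hprKV
    have hstep : PySem.Chars.replace l k2 w2 = l := by
      rw [pvReplace_eq _ _ _ hne]
      exact pvRep_id _ _ _ hne (fun i => hno i _ hprKV)
    simp only [List.foldl_cons, hstep]
    exact ih (fun x hx => hP x (List.mem_cons_of_mem _ hx))

theorem pvChain_id (l : List Char)
    (hno : ∀ q, ∀ pr, pr ∈ pvKV → ¬ pr.1 <+: l.drop q) : pvChain l = l :=
  pvFoldl_id l hno pvKV (fun _ h => h)

theorem pvSub_id (l : List Char)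
    (hno : ∀ q, ∀ pr, pr ∈ pvKV → ¬ pr.1 <+: l.drop q) : pvSub l = l := by
  induction l with
  | nil => simp [pvSub]
  | cons c t ih =>
    have h0 : pvTryKeys pvKV (c :: t) = none := by
      refine List.find?_eq_none.mpr (fun pr hpr => ?_)
      have := hno 0 pr hpr
      simpa [List.isPrefixOf_iff_prefix] using this
    rw [pvSub_cons_none _ _ h0]
    rw [ih (fun q pr hpr => by
      have := hno (q + 1) pr hpr
      simpa using this)]

-- ---- decomposition of the single scan at the first match ----
theorem pvSub_skip : ∀ (u rest : List Char),
    (∀ q, q < u.length → ∀ pr, pr ∈ pvKV → ¬ pr.1 <+: (u ++ rest).drop q) →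
    pvSub (u ++ rest) = u ++ pvSub rest := by
  intro u
  induction u with
  | nil => intro rest _; simp
  | cons c u' ih =>
    intro rest h
    have h0 : pvTryKeys pvKV (c :: (u' ++ rest)) = none := by
      refine List.find?_eq_none.mpr (fun pr hpr => ?_)
      have := h 0 (by simp) pr hpr
      simpa [List.isPrefixOf_iff_prefix] using this
    rw [List.cons_append, pvSub_cons_none _ _ h0]
    rw [ih rest (fun q hq pr hpr => by
      have := h (q + 1) (by simpa using Nat.succ_lt_succ hq) pr hpr
      simpa using this)]
    simp

theorem pvFind_first (s : List Char) :
    ∀ (L : List (List Char × List Char)) (kw : List Char × List Char), kw ∈ L →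
      kw.1 <+: s → (∀ pr ∈ L, pr ≠ kw → ¬ pr.1 <+: s) →
      L.find? (fun pr => pr.1.isPrefixOf s) = some kw := by
  intro L
  induction L with
  | nil => intro kw h; simp at h
  | cons a L ih =>
    intro kw hmem hpre huniq
    by_cases ha : a = kw
    · subst ha
      rw [List.find?_cons_of_pos (by simpa [List.isPrefixOf_iff_prefix] using hpre)]
    · rw [List.find?_cons_of_neg (by
        simpa [List.isPrefixOf_iff_prefix] using huniq a List.mem_cons_self ha)]
      refine ih kw ?_ hpre (fun pr hpr => huniq pr (List.mem_cons_of_mem _ hpr))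
      rcases List.mem_cons.mp hmem with he | he
      · exact absurd he.symm ha
      · exact he

theorem pvSub_decomp (u kj wj r : List Char) (hmem : (kj, wj) ∈ pvKV)
    (hu : ∀ q, q < u.length → ∀ pr, pr ∈ pvKV → ¬ pr.1 <+: (u ++ (kj ++ r)).drop q) :
    pvSub (u ++ (kj ++ r)) = u ++ (wj ++ pvSub r) := by
  rw [pvSub_skip u (kj ++ r) hu]
  congr 1
  have huniq : ∀ pr ∈ pvKV, pr ≠ (kj, wj) → ¬ pr.1 <+: kj ++ r := by
    intro pr hpr hne hp
    rcases List.prefix_or_prefix_of_prefix hp (List.prefix_append kj r) with hc | hc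
    · exact (pvCond2P pr hpr (kj, wj) hmem hne).1 hc
    · exact (pvCond2P pr hpr (kj, wj) hmem hne).2 hc
  have hfind : pvTryKeys pvKV (kj ++ r) = some (kj, wj) :=
    pvFind_first _ pvKV _ hmem (List.prefix_append _ _) huniq
  have hkjne := pvKV_key_ne_nil _ hmem
  cases hkj : kj with
  | nil => exact absurd hkj hkjne
  | cons c t =>
    rw [hkj] at hfind
    rw [List.cons_append] at hfind
    rw [List.cons_append, pvSub_cons_some _ _ _ hfind]
    rw [← List.cons_append, List.drop_left]

-- ---- the main correspondence, by strong induction on the length ----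
theorem pvMain : ∀ (n : ℕ) (l : List Char), l.length ≤ n → pvChain l = pvSub l := by
  intro n
  induction n with
  | zero =>
    intro l h
    have : l = [] := by cases l <;> simp_all
    subst this
    have hno : ∀ q, ∀ pr, pr ∈ pvKV → ¬ pr.1 <+: ([] : List Char).drop q := by
      intro q pr hpr hp
      rw [List.drop_nil] at hp
      exact pvKV_key_ne_nil _ hpr (List.prefix_nil.mp hp)
    rw [pvChain_id _ hno, pvSub_id _ hno]
  | succ n ih =>
    intro l hl
    by_cases hex : ∃ q, ∃ pr, pr ∈ pvKV ∧ pr.1 <+: l.drop q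
    · obtain ⟨kjp, hmem, hpre⟩ := Nat.find_spec hex
      obtain ⟨kj, wj⟩ := kjp
      have hkjne := pvKV_key_ne_nil _ hmem
      have hkj0 : 0 < kj.length := List.length_pos_iff.mpr hkjne
      have hplen : Nat.find hex < l.length := by
        by_contra h
        rw [Nat.not_lt] at h
        rw [List.drop_eq_nil_iff.mpr h] at hpre
        exact hkjne (List.prefix_nil.mp hpre)
      obtain ⟨s2, hs2⟩ := hpre
      have hs2' : s2 = l.drop (Nat.find hex + kj.length) := by
        have := congrArg (List.drop kj.length) hs2
        rw [List.drop_left, List.drop_drop] at this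
        rw [this, Nat.add_comm]
      have hl' : l = l.take (Nat.find hex) ++ (kj ++ l.drop (Nat.find hex + kj.length)) := by
        rw [← hs2', hs2]
        exact (List.take_append_drop _ _).symm
      have hu : ∀ q, q < (l.take (Nat.find hex)).length → ∀ pr, pr ∈ pvKV →
          ¬ pr.1 <+: (l.take (Nat.find hex) ++ (kj ++ l.drop (Nat.find hex + kj.length))).drop q := by
        intro q hq pr hpr hp
        rw [← hl'] at hp
        have hqP : q < Nat.find hex := by
          rw [List.length_take] at hq
          omega
        exact Nat.find_min hex hqP ⟨pr, hpr, hp⟩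
      have hrlen : (l.drop (Nat.find hex + kj.length)).length ≤ n := by
        rw [List.length_drop]
        omega
      rw [hl', pvChain_decomp _ _ _ _ hmem hu, pvSub_decomp _ _ _ _ hmem hu, ih _ hrlen]
    · have hno : ∀ q, ∀ pr, pr ∈ pvKV → ¬ pr.1 <+: l.drop q :=
        fun q pr hpr hp => hex ⟨q, pr, hpr, hp⟩
      rw [pvChain_id _ hno, pvSub_id _ hno]

-- ---- bridging the A port to the character level ----
theorem pvA_toList (text : String) : (convert_colors text).toList = pvChain text.toList := by
  simp only [convert_colors, pvChain, pvKV, List.foldl_cons, List.foldl_nil,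
    PySem.Str.toList_replace]

-- ===== VERDICT (by name: the statement is the Claim_ definition above) =====
theorem convert_colors_spec : Claim_equal_convert_colors := by
  intro text _
  show convert_colors text = convert_colors_alt text
  have h : (convert_colors text).toList = (convert_colors_alt text).toList := by
    rw [pvA_toList, pvMain text.toList.length text.toList le_rfl]
    simp [convert_colors_alt, String.toList_ofList]
  calc convert_colors text = String.ofList (convert_colors text).toList := String.ofList_toList.symm
    _ = String.ofList (convert_colors_alt text).toList := by rw [h]
    _ = convert_colors_alt text := String.ofList_toList
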